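-- pv_equiv track=rewrite | github.com/sunkthought/minions-openwebui | generated_functions/minion_default_function.py | _fix_json_escape_sequences
-- ===== SOURCE A (Python) =====
-- def _fix_json_escape_sequences(json_string: str) -> str:
--     """Fix common escape sequence issues in JSON strings generated by local models"""
--     # Use simple string replacement to avoid regex escape issues
--
--     # Fix invalid backslash escapes that are not valid JSON escape sequences
--     # Valid JSON escapes: \" \\ \/ \b \f \n \r \t \uXXXX
--     replacements = {
--         '\\a': 'a', '\\c': 'c', '\\d': 'd', '\\e': 'e', '\\g': 'g',
--         '\\h': 'h', '\\i': 'i', '\\j': 'j', '\\k': 'k', '\\l': 'l',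
--         '\\m': 'm', '\\o': 'o', '\\p': 'p', '\\q': 'q', '\\s': 's',
--         '\\w': 'w', '\\x': 'x', '\\y': 'y', '\\z': 'z'
--     }
--
--     for invalid_escape, replacement in replacements.items():
--         json_string = json_string.replace(invalid_escape, replacement)
--
--     return json_string
-- ===== SOURCE B (Python) =====
-- def _fix_json_escape_sequences(json_string: str) -> str:
--     """Single left-to-right scan: drop the backslash of any invalid escape."""
--     invalid = {'a', 'c', 'd', 'e', 'g', 'h', 'i', 'j', 'k', 'l',
--                'm', 'o', 'p', 'q', 's', 'w', 'x', 'y', 'z'}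
--     out = []
--     i = 0
--     n = len(json_string)
--     while i < n:
--         ch = json_string[i]
--         if ch == '\\' and i + 1 < n and json_string[i + 1] in invalid:
--             out.append(json_string[i + 1])
--             i += 2
--         else:
--             out.append(ch)
--             i += 1
--     return ''.join(out)
-- ===== Notes on version B (the rewrite author's own statement) =====
-- stated objective: alternative
-- what changed: A runs 19 sequential whole-string str.replace passes, one per invalid escape letter; B makes a single left-to-right index scan with a membership set, dropping the backslash of each invalid escape in one pass.
import Mathlib
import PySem

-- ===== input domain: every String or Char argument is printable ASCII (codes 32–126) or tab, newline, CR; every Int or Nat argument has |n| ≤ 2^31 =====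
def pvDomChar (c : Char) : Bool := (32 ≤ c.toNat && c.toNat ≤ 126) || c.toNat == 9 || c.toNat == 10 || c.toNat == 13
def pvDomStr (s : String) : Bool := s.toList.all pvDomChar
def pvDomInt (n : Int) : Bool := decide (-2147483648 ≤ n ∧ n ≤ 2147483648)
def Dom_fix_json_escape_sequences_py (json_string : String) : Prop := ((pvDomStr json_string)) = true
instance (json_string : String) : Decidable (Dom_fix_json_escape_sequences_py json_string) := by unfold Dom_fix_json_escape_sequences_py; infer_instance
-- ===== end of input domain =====

-- B replaces A's 19 sequential whole-string str.replace passes by ONE left-to-right scan with a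
-- membership set of the invalid escape letters (alternative decomposition; identical result).

-- ===== PORT A =====
-- the `replacements` dict of A, as an association list in insertion order
def pvReplacements : List (String × String) :=
  [("\\a", "a"), ("\\c", "c"), ("\\d", "d"), ("\\e", "e"), ("\\g", "g"),
   ("\\h", "h"), ("\\i", "i"), ("\\j", "j"), ("\\k", "k"), ("\\l", "l"),
   ("\\m", "m"), ("\\o", "o"), ("\\p", "p"), ("\\q", "q"), ("\\s", "s"),
   ("\\w", "w"), ("\\x", "x"), ("\\y", "y"), ("\\z", "z")]

def fix_json_escape_sequences_py (json_string : String) : String :=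
  pvReplacements.foldl (fun js p => PySem.Str.replace js p.1 p.2) json_string

-- ===== PORT B =====
-- the `invalid` set of B (distinct elements, insertion order)
def pvInvalid : List Char :=
  ['a', 'c', 'd', 'e', 'g', 'h', 'i', 'j', 'k', 'l',
   'm', 'o', 'p', 'q', 's', 'w', 'x', 'y', 'z']

-- B's while-loop over the index i, as structural recursion on the character list:
-- a backslash followed by an invalid letter emits the letter and advances by 2, else advance by 1
def pvScan : List Char → List Char
  | [] => []
  | [c] => [c]
  | a :: b :: rest =>
    if a == '\\' && pvInvalid.contains b then b :: pvScan rest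
    else a :: pvScan (b :: rest)
termination_by l => l.length

def fix_json_escape_sequences_py_alt (json_string : String) : String :=
  String.ofList (pvScan json_string.toList)

-- ===== PRECONDITION & SPEC =====
def Spec_fix_json_escape_sequences_py (json_string : String) (out : String) : Prop := out = fix_json_escape_sequences_py_alt json_string
instance (json_string : String) (out : String) : Decidable (Spec_fix_json_escape_sequences_py json_string out) := by unfold Spec_fix_json_escape_sequences_py; infer_instance

-- ===== CLAIM (what is proved, stated in full; the proofs are below) =====
def Claim_equal_fix_json_escape_sequences_py : Prop := ∀ (json_string : String), Dom_fix_json_escape_sequences_py json_string → Spec_fix_json_escape_sequences_py json_string (fix_json_escape_sequences_py json_string)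

-- ===== LEMMAS AND PROOFS =====

-- the scan with an arbitrary invalid-letter predicate
def scanP (p : Char → Bool) : List Char → List Char
  | [] => []
  | [c] => [c]
  | a :: b :: rest =>
    if a == '\\' && p b then b :: scanP p rest
    else a :: scanP p (b :: rest)
termination_by l => l.length

theorem scanP_cons_of_ne (p : Char → Bool) (x : Char) (t : List Char)
    (hx : (x == '\\') = false) : scanP p (x :: t) = x :: scanP p t := by
  cases t with
  | nil => simp [scanP]
  | cons y t' => simp [scanP, hx]

theorem scanP_head (p : Char → Bool) (x : Char) (t : List Char) :
    ∃ h0 r, scanP p (x :: t) = h0 :: r ∧ (h0 = x ∨ p h0 = true) := by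
  cases t with
  | nil => exact ⟨x, [], by simp [scanP], Or.inl rfl⟩
  | cons y t' =>
    by_cases h : (x == '\\' && p y) = true
    · exact ⟨y, scanP p t', by simp [scanP, h], Or.inr ((Bool.and_eq_true _ _).mp h).2⟩
    · exact ⟨x, scanP p (y :: t'), by simp [scanP, h], Or.inl rfl⟩

theorem scanP_false (l : List Char) : scanP (fun _ => false) l = l := by
  suffices H : ∀ n (l : List Char), l.length ≤ n → scanP (fun _ => false) l = l from
    H l.length l le_rfl
  intro n
  induction n with
  | zero =>
    intro l h
    cases l with
    | nil => simp [scanP]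
    | cons a t => simp at h
  | succ n ih =>
    intro l h
    match l with
    | [] => simp [scanP]
    | [x] => simp [scanP]
    | a :: b :: rest =>
      have h2 : (b :: rest).length ≤ n := by simp at h ⊢; omega
      simp [scanP, ih (b :: rest) h2]

theorem pvScan_eq (l : List Char) : pvScan l = scanP (fun x => pvInvalid.contains x) l := by
  suffices H : ∀ n (l : List Char), l.length ≤ n →
      pvScan l = scanP (fun x => pvInvalid.contains x) l from H l.length l le_rfl
  intro n
  induction n with
  | zero =>
    intro l h
    cases l with
    | nil => simp [pvScan, scanP]
    | cons a t => simp at h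
  | succ n ih =>
    intro l h
    match l with
    | [] => simp [pvScan, scanP]
    | [x] => simp [pvScan, scanP]
    | a :: b :: rest =>
      have h1 : rest.length ≤ n := by simp at h; omega
      have h2 : (b :: rest).length ≤ n := by simp at h ⊢; omega
      simp [pvScan, scanP, ih rest h1, ih (b :: rest) h2]

-- composing a one-letter scan after a p-scan is the (p ∪ {c})-scan
theorem scanP_comp (p : Char → Bool) (c : Char) (hp : p '\\' = false)
    (hc : c ≠ '\\') (hpc : p c = false) (l : List Char) :
    scanP (fun x => x == c) (scanP p l) = scanP (fun x => p x || x == c) l := by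
  suffices H : ∀ n (l : List Char), l.length ≤ n →
      scanP (fun x => x == c) (scanP p l) = scanP (fun x => p x || x == c) l from
    H l.length l le_rfl
  intro n
  induction n with
  | zero =>
    intro l h
    cases l with
    | nil => simp [scanP]
    | cons a t => simp at h
  | succ n ih =>
    intro l h
    match l with
    | [] => simp [scanP]
    | [x] => simp [scanP]
    | a :: b :: rest =>
      have h1 : rest.length ≤ n := by simp at h; omega
      have h2 : (b :: rest).length ≤ n := by simp at h ⊢; omega
      by_cases hcond : (a == '\\' && p b) = true
      · -- the p-scan consumes the pair, emitting b (b is not a backslash)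
        obtain ⟨ha, hpb⟩ := (Bool.and_eq_true _ _).mp hcond
        have hbne : (b == '\\') = false := by
          by_contra hbb
          rw [Bool.not_eq_false, beq_iff_eq] at hbb
          rw [hbb, hp] at hpb
          exact Bool.false_ne_true hpb
        rw [show scanP p (a :: b :: rest) = b :: scanP p rest from by simp [scanP, hcond]]
        rw [scanP_cons_of_ne _ _ _ hbne, ih rest h1]
        have hcond' : (a == '\\' && (p b || b == c)) = true := by simp [ha, hpb]
        simp [scanP, hcond']
      · by_cases ha : (a == '\\') = true
        · have hpb : p b = false := by
            by_contra hpb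
            rw [Bool.not_eq_false] at hpb
            simp [ha, hpb] at hcond
          by_cases hbc0 : (b == c) = true
          · -- the c-scan consumes the pair the p-scan left intact
            have hbeq : b = c := beq_iff_eq.mp hbc0
            have hbne : (b == '\\') = false := by
              subst hbeq; simpa using hc
            rw [show scanP p (a :: b :: rest) = a :: scanP p (b :: rest) from by
              simp [scanP, hcond]]
            rw [scanP_cons_of_ne _ _ _ hbne]
            have haeq : a = '\\' := beq_iff_eq.mp ha
            rw [show scanP (fun x => x == c) (a :: b :: scanP p rest)
                  = b :: scanP (fun x => x == c) (scanP p rest) from by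
              simp [scanP, ha, hbc0]]
            rw [ih rest h1]
            have hcond' : (a == '\\' && (p b || b == c)) = true := by simp [ha, hbc0]
            simp [scanP, hcond']
          · have hbc : (b == c) = false := by simpa using hbc0
            -- neither scan touches position 0: heads agree, recurse on b :: rest
            rw [show scanP p (a :: b :: rest) = a :: scanP p (b :: rest) from by
              simp [scanP, hcond]]
            obtain ⟨h0, r, he, hh⟩ := scanP_head p b rest
            have h0c : (h0 == c) = false := by
              cases hh with
              | inl e => rw [e]; exact hbc
              | inr hq =>
                by_contra h0c
                rw [Bool.not_eq_false, beq_iff_eq] at h0c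
                rw [h0c, hpc] at hq
                exact Bool.false_ne_true hq
            rw [he]
            rw [show scanP (fun x => x == c) (a :: h0 :: r)
                  = a :: scanP (fun x => x == c) (h0 :: r) from by simp [scanP, h0c]]
            rw [← he, ih (b :: rest) h2]
            have hcond' : (a == '\\' && (p b || b == c)) = false := by simp [hpb, hbc]
            simp [scanP, hcond']
        · -- a is not a backslash: both scans emit it unchanged
          have haf : (a == '\\') = false := by simpa using ha
          rw [scanP_cons_of_ne p a _ haf, scanP_cons_of_ne _ a _ haf,
              ih (b :: rest) h2, scanP_cons_of_ne _ a _ haf]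

-- one str.replace of an invalid escape is the one-letter scan
theorem replace_eq_scanP (c : Char) (hc : c ≠ '\\') (l : List Char) :
    PySem.Chars.replace l ['\\', c] [c] = scanP (fun x => x == c) l := by
  have go_eq : ∀ fuel (l acc : List Char), l.length ≤ fuel →
      PySem.Chars.replace.go ['\\', c] [c] fuel l acc
        = acc.reverse ++ scanP (fun x => x == c) l := by
    intro fuel
    induction fuel with
    | zero =>
      intro l acc h
      cases l with
      | nil => simp [PySem.Chars.replace.go, scanP]
      | cons a t => simp at h
    | succ n ih =>
      intro l acc h
      match l with
      | [] => simp [PySem.Chars.replace.go, scanP]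
      | x :: t =>
        rw [show PySem.Chars.replace.go ['\\', c] [c] (n + 1) (x :: t) acc
              = if ['\\', c].isPrefixOf (x :: t) then
                  PySem.Chars.replace.go ['\\', c] [c] n (List.drop ['\\', c].length (x :: t))
                    ([c].reverse ++ acc)
                else PySem.Chars.replace.go ['\\', c] [c] n t (x :: acc) from by
          simp [PySem.Chars.replace.go]]
        by_cases hpre : ['\\', c].isPrefixOf (x :: t) = true
        · rw [if_pos hpre]
          match t, hpre with
          | [], hpre => simp [List.isPrefixOf] at hpre
          | y :: t', hpre =>
            simp only [List.isPrefixOf, Bool.and_eq_true, beq_iff_eq] at hpre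
            obtain ⟨hx, hy, -⟩ := hpre
            have ht' : t'.length ≤ n := by simp at h; omega
            rw [show List.drop ['\\', c].length (x :: y :: t') = t' from rfl]
            rw [ih t' ([c].reverse ++ acc) ht']
            subst hx; subst hy
            rw [show scanP (fun x => x == c) ('\\' :: c :: t')
                  = c :: scanP (fun x => x == c) t' from by simp [scanP]]
            simp
        · rw [if_neg hpre]
          have ht : t.length ≤ n := by simp at h; omega
          rw [ih t (x :: acc) ht]
          have hstep : scanP (fun x => x == c) (x :: t) = x :: scanP (fun x => x == c) t := by
            cases t with
            | nil => simp [scanP]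
            | cons y t' =>
              have : (x == '\\' && (y == c)) = false := by
                by_contra hb
                rw [Bool.not_eq_false, Bool.and_eq_true, beq_iff_eq, beq_iff_eq] at hb
                obtain ⟨hx, hy⟩ := hb
                subst hx; subst hy
                simp [List.isPrefixOf] at hpre
              simp [scanP, this]
          rw [hstep]
          simp
  rw [show PySem.Chars.replace l ['\\', c] [c]
        = PySem.Chars.replace.go ['\\', c] [c] l.length l [] from by
    simp [PySem.Chars.replace]]
  rw [go_eq l.length l [] le_rfl]
  simp

-- chaining the one-letter scans over a list of distinct non-backslash letters
theorem scanP_chain (ls : List Char) :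
    ∀ (p : Char → Bool) (l : List Char), p '\\' = false →
      ls.Pairwise (· ≠ ·) → (∀ x ∈ ls, x ≠ '\\' ∧ p x = false) →
      ls.foldl (fun t c => scanP (fun x => x == c) t) (scanP p l)
        = scanP (fun x => p x || decide (x ∈ ls)) l := by
  induction ls with
  | nil =>
    intro p l hp _ _
    simp only [List.foldl_nil]
    congr 1
    funext x
    simp
  | cons c ls' ih =>
    intro p l hp hpair hall
    obtain ⟨hcb, hpc⟩ := hall c List.mem_cons_self
    rw [List.foldl_cons, scanP_comp p c hp hcb hpc l]
    have hne : ∀ x ∈ ls', c ≠ x := (List.pairwise_cons.mp hpair).1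
    have hpair' : ls'.Pairwise (· ≠ ·) := (List.pairwise_cons.mp hpair).2
    have hall' : ∀ x ∈ ls', x ≠ '\\' ∧ (p x || x == c) = false := by
      intro x hx
      obtain ⟨hxb, hpx⟩ := hall x (List.mem_cons_of_mem _ hx)
      refine ⟨hxb, ?_⟩
      have : (x == c) = false := by
        simp only [beq_eq_false_iff_ne]
        exact fun e => hne x hx e.symm
      simp [hpx, this]
    have hp' : (fun x => p x || x == c) '\\' = false := by
      have : ('\\' == c) = false := by
        simp only [beq_eq_false_iff_ne]
        exact fun e => hcb e.symm
      simp [hp, this]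
    rw [ih (fun x => p x || x == c) l hp' hpair' hall']
    congr 1
    funext x
    rw [Bool.eq_iff_iff]
    simp [List.mem_cons, or_assoc]

-- ===== VERDICT (by name: the statement is the Claim_ definition above) =====
set_option maxRecDepth 4096 in
theorem fix_json_escape_sequences_py_spec : Claim_equal_fix_json_escape_sequences_py := by
  intro s _
  unfold Spec_fix_json_escape_sequences_py
  apply String.toList_inj.mp
  rw [fix_json_escape_sequences_py_alt, String.toList_ofList, pvScan_eq]
  have chain := scanP_chain pvInvalid (fun _ => false) s.toList rfl (by decide)
    (by intro x hx; refine ⟨?_, rfl⟩; rintro rfl; exact absurd hx (by decide))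
  rw [scanP_false] at chain
  have hpred : (fun x => false || decide (x ∈ pvInvalid))
      = (fun x => pvInvalid.contains x) := by
    funext x
    rw [Bool.eq_iff_iff]
    simp
  rw [hpred] at chain
  rw [← chain]
  unfold fix_json_escape_sequences_py pvReplacements pvInvalid
  simp only [List.foldl_cons, List.foldl_nil, PySem.Str.toList_replace]
  simp only [show ("\\a" : String).toList = ['\\', 'a'] from rfl,
    show ("\\c" : String).toList = ['\\', 'c'] from rfl,
    show ("\\d" : String).toList = ['\\', 'd'] from rfl,
    show ("\\e" : String).toList = ['\\', 'e'] from rfl,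
    show ("\\g" : String).toList = ['\\', 'g'] from rfl,
    show ("\\h" : String).toList = ['\\', 'h'] from rfl,
    show ("\\i" : String).toList = ['\\', 'i'] from rfl,
    show ("\\j" : String).toList = ['\\', 'j'] from rfl,
    show ("\\k" : String).toList = ['\\', 'k'] from rfl,
    show ("\\l" : String).toList = ['\\', 'l'] from rfl,
    show ("\\m" : String).toList = ['\\', 'm'] from rfl,
    show ("\\o" : String).toList = ['\\', 'o'] from rfl,
    show ("\\p" : String).toList = ['\\', 'p'] from rfl,
    show ("\\q" : String).toList = ['\\', 'q'] from rfl,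
    show ("\\s" : String).toList = ['\\', 's'] from rfl,
    show ("\\w" : String).toList = ['\\', 'w'] from rfl,
    show ("\\x" : String).toList = ['\\', 'x'] from rfl,
    show ("\\y" : String).toList = ['\\', 'y'] from rfl,
    show ("\\z" : String).toList = ['\\', 'z'] from rfl,
    show ("a" : String).toList = ['a'] from rfl,
    show ("c" : String).toList = ['c'] from rfl,
    show ("d" : String).toList = ['d'] from rfl,
    show ("e" : String).toList = ['e'] from rfl,
    show ("g" : String).toList = ['g'] from rfl,
    show ("h" : String).toList = ['h'] from rfl,
    show ("i" : String).toList = ['i'] from rfl,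
    show ("j" : String).toList = ['j'] from rfl,
    show ("k" : String).toList = ['k'] from rfl,
    show ("l" : String).toList = ['l'] from rfl,
    show ("m" : String).toList = ['m'] from rfl,
    show ("o" : String).toList = ['o'] from rfl,
    show ("p" : String).toList = ['p'] from rfl,
    show ("q" : String).toList = ['q'] from rfl,
    show ("s" : String).toList = ['s'] from rfl,
    show ("w" : String).toList = ['w'] from rfl,
    show ("x" : String).toList = ['x'] from rfl,
    show ("y" : String).toList = ['y'] from rfl,
    show ("z" : String).toList = ['z'] from rfl]
  simp only [replace_eq_scanP 'a' (by decide), replace_eq_scanP 'c' (by decide),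
    replace_eq_scanP 'd' (by decide), replace_eq_scanP 'e' (by decide),
    replace_eq_scanP 'g' (by decide), replace_eq_scanP 'h' (by decide),
    replace_eq_scanP 'i' (by decide), replace_eq_scanP 'j' (by decide),
    replace_eq_scanP 'k' (by decide), replace_eq_scanP 'l' (by decide),
    replace_eq_scanP 'm' (by decide), replace_eq_scanP 'o' (by decide),
    replace_eq_scanP 'p' (by decide), replace_eq_scanP 'q' (by decide),
    replace_eq_scanP 's' (by decide), replace_eq_scanP 'w' (by decide),
    replace_eq_scanP 'x' (by decide), replace_eq_scanP 'y' (by decide),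
    replace_eq_scanP 'z' (by decide)]
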